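-- pv_equiv track=rewrite | github.com/anguyen798/test | test_folder/solutions_py_3_20181213T1640/solutions-py-3/ch05/26/bar_code.py | convertBarCode
-- ===== SOURCE A (Python) =====
-- def convertDigit(s) :
--    if s == ":::||" :
--       return 1
--    if s == "::|:|" :
--       return 2
--    if s == "::||:" :
--       return 3
--    if s == ":|::|" :
--       return 4
--    if s == ":|:|:" :
--       return 5
--    if s == ":||::" :
--       return 6
--    if s == "|:::|" :
--       return 7
--    if s == "|::|:" :
--       return 8
--    if s == "|:|::" :
--       return 9
--    if s == "||:::" :
--       return 0
--
--    # Indicate an error by returing -1.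
--    return -1
--
-- def convertBarCode(barCode) :
--    # Verify the length and frame bars.
--    if len(barCode) != 32 or barCode[0] != "|" or barCode[31] != "|" :
--       return -1
--
--    # Compute the total of the digits so that we can verify that the check
--    # digit is correct.
--    total = 0
--
--    # Convert each of the 5 digits, forming the zip code.
--    zipCode = 0
--    for i in range(1, 22, 5) :
--       zipCode = zipCode * 10
--       digit = convertDigit(barCode[i : i + 5])
--       if digit == -1 :
--          return -1
--       total = total + digit
--       zipCode = zipCode + digit
--
--    # Conver the check digit and verify that it is correct.
--    checkDigit = convertDigit(barCode[26 : 31])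
--    if (total + checkDigit) % 10 != 0 :
--       return -1
--
--    # Return the numeric zip code.
--    return zipCode
-- ===== SOURCE B (Python) =====
-- # POSTNET decoding by positional weights (7,4,2,1,0) instead of a ten-way string table;
-- # same size/frame/checksum handling as the original (return value only).
--
-- _WEIGHTS = (7, 4, 2, 1, 0)
--
-- def _decode(group):
--     # A valid POSTNET digit group has exactly two full bars and three half bars;
--     # its value is the weighted sum of the full-bar positions, with 11 standing for 0.
--     bars = 0
--     total = 0
--     for w, ch in zip(_WEIGHTS, group):
--         if ch == "|":
--             bars += 1
--             total += w
--         elif ch != ":":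
--             return -1
--     if bars != 2:
--         return -1
--     return total % 11
--
-- def convertBarCode(barCode):
--     if len(barCode) != 32 or barCode[0] != "|" or barCode[-1] != "|":
--         return -1
--     digits = [_decode(barCode[i:i + 5]) for i in range(1, 31, 5)]
--     if -1 in digits[:5] or sum(digits) % 10 != 0:
--         return -1
--     zipCode = 0
--     for d in digits[:5]:
--         zipCode = zipCode * 10 + d
--     return zipCode
-- ===== Notes on version B (the rewrite author's own statement) =====
-- stated objective: alternative
-- what changed: convertDigit's ten-way string-table lookup is replaced by arithmetic POSTNET decoding (one pass over zip((7,4,2,1,0), group) counting full bars and summing positional weights, with sum % 11 mapping 11 to 0), and the main routine builds all six group digits with one list comprehension and checks them by membership/sum instead of an early-returning loop plus a separate check digit.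
import Mathlib
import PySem

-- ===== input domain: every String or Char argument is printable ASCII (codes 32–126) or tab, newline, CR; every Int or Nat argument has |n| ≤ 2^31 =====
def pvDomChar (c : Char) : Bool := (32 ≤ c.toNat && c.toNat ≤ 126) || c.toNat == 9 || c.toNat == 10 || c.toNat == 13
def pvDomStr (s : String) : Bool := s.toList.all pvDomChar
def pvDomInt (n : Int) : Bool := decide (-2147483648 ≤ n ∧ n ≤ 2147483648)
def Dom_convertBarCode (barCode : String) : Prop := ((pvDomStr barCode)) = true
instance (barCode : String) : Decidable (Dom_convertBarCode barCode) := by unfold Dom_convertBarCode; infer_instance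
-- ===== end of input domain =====

-- B replaces the ten-way string-table lookup of convertDigit by arithmetic POSTNET decoding
-- (one pass counting full bars and summing positional weights 7,4,2,1,0, with 11 read as 0);
-- objective: alternative — a different digit-decoding algorithm of the same cost.

-- ===== PORT A =====
def convertDigit (s : String) : Int :=
  if s = ":::||" then 1
  else if s = "::|:|" then 2
  else if s = "::||:" then 3
  else if s = ":|::|" then 4
  else if s = ":|:|:" then 5
  else if s = ":||::" then 6
  else if s = "|:::|" then 7
  else if s = "|::|:" then 8
  else if s = "|:|::" then 9
  else if s = "||:::" then 0
  else -1

-- A's 'for i in range(1, 22, 5)' loop with its early 'return -1', carrying (total, zipCode)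
def convertLoop (barCode : String) : List Int → Int → Int → Option (Int × Int)
  | [], total, zipCode => some (total, zipCode)
  | i :: rest, total, zipCode =>
    let z := zipCode * 10
    let digit := convertDigit (PySem.Str.slice barCode (some i) (some (i + 5)))
    if digit = -1 then none
    else convertLoop barCode rest (total + digit) (z + digit)

def convertBarCode (barCode : String) : Int :=
  if PySem.Str.len barCode ≠ 32 ∨ PySem.Str.pyGet? barCode 0 ≠ some '|'
      ∨ PySem.Str.pyGet? barCode 31 ≠ some '|' then -1
  else
    match convertLoop barCode (PySem.List.pyRange 1 22 5) 0 0 with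
    | none => -1
    | some (total, zipCode) =>
      let checkDigit := convertDigit (PySem.Str.slice barCode (some 26) (some 31))
      if PySem.Int.mod (total + checkDigit) 10 ≠ 0 then -1 else zipCode

-- ===== PORT B =====
-- Source B's single pass over zip(_WEIGHTS, group) with its early 'return -1', carrying (bars, total)
def pvDecodeLoop : List (Int × Char) → Int → Int → Option (Int × Int)
  | [], bars, total => some (bars, total)
  | (w, ch) :: rest, bars, total =>
    if ch = '|' then pvDecodeLoop rest (bars + 1) (total + w)
    else if ch = ':' then pvDecodeLoop rest bars total
    else none

def pvDecode (group : String) : Int :=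
  match pvDecodeLoop (List.zip [7, 4, 2, 1, 0] group.toList) 0 0 with
  | none => -1
  | some (bars, total) => if bars ≠ 2 then -1 else PySem.Int.mod total 11

def convertBarCode_alt (barCode : String) : Int :=
  if PySem.Str.len barCode ≠ 32 ∨ PySem.Str.pyGet? barCode 0 ≠ some '|'
      ∨ PySem.Str.pyGet? barCode (-1) ≠ some '|' then -1
  else
    let digits := (PySem.List.pyRange 1 31 5).map
      (fun i => pvDecode (PySem.Str.slice barCode (some i) (some (i + 5))))
    if (-1 : Int) ∈ digits.take 5 ∨ PySem.Int.mod digits.sum 10 ≠ 0 then -1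
    else (digits.take 5).foldl (fun z d => z * 10 + d) 0

-- ===== PRECONDITION & SPEC =====
def Spec_convertBarCode (barCode : String) (out : Int) : Prop := out = convertBarCode_alt barCode
instance (barCode : String) (out : Int) : Decidable (Spec_convertBarCode barCode out) := by unfold Spec_convertBarCode; infer_instance

-- ===== CLAIM (what is proved, stated in full; the proofs are below) =====
def Claim_equal_convertBarCode : Prop := ∀ (barCode : String), Dom_convertBarCode barCode → Spec_convertBarCode barCode (convertBarCode barCode)

-- ===== LEMMAS AND PROOFS =====

-- the two digit decoders agree on every 5-character group
lemma digit_eq (s : String) (h : s.toList.length = 5) : convertDigit s = pvDecode s := by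
  simp only [convertDigit, pvDecode, String.ext_iff]
  generalize hl : s.toList = l at *
  obtain ⟨a, l, rfl⟩ := List.exists_of_length_succ l h
  have h : l.length = 4 := by simpa using h
  obtain ⟨b, l, rfl⟩ := List.exists_of_length_succ l h
  have h : l.length = 3 := by simpa using h
  obtain ⟨c, l, rfl⟩ := List.exists_of_length_succ l h
  have h : l.length = 2 := by simpa using h
  obtain ⟨d, l, rfl⟩ := List.exists_of_length_succ l h
  have h : l.length = 1 := by simpa using h
  obtain ⟨e, l, rfl⟩ := List.exists_of_length_succ l h
  have h : l.length = 0 := by simpa using h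
  rw [List.length_eq_zero_iff] at h
  subst h
  have tri : ∀ c : Char, c = ':' ∨ c = '|' ∨ (c ≠ ':' ∧ c ≠ '|') := by
    intro c; by_cases h1 : c = ':'
    · exact Or.inl h1
    · by_cases h2 : c = '|'
      · exact Or.inr (Or.inl h2)
      · exact Or.inr (Or.inr ⟨h1, h2⟩)
  rcases tri a with rfl | rfl | ⟨ha1, ha2⟩ <;>
  rcases tri b with rfl | rfl | ⟨hb1, hb2⟩ <;>
  rcases tri c with rfl | rfl | ⟨hc1, hc2⟩ <;>
  rcases tri d with rfl | rfl | ⟨hd1, hd2⟩ <;>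
  rcases tri e with rfl | rfl | ⟨he1, he2⟩ <;>
  simp_all [pvDecodeLoop, List.zip]

-- every 5-wide slice of a 32-character string has exactly 5 characters
lemma slice_len5 (s : String) (h : s.toList.length = 32) (a b : Int)
    (h0 : 0 ≤ a) (hb : 0 ≤ b) (h5 : b.toNat - a.toNat = 5) (hfit : a.toNat + 5 ≤ 32) :
    (PySem.Str.slice s (some a) (some b)).toList.length = 5 := by
  rw [PySem.Str.toList_slice, PySem.Chars.slice_eq_listSlice, PySem.List.slice_toNat]
  · simp [h]; omega
  · exact h0
  · exact hb

-- ===== VERDICT (by name: the statement is the Claim_ definition above) =====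
set_option maxHeartbeats 1000000 in
theorem convertBarCode_spec : Claim_equal_convertBarCode := by
  unfold Claim_equal_convertBarCode Spec_convertBarCode
  intro s _
  by_cases h32 : s.toList.length = 32
  · have hget : PySem.Str.pyGet? s (-1) = PySem.Str.pyGet? s 31 := by
      simp [PySem.List.pyGet?, PySem.List.pyIdx?, h32]
    unfold convertBarCode convertBarCode_alt
    rw [hget]
    by_cases hg : PySem.Str.len s ≠ 32 ∨ PySem.Str.pyGet? s 0 ≠ some '|' ∨ PySem.Str.pyGet? s 31 ≠ some '|'
    · rw [if_pos hg, if_pos hg]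
    · rw [if_neg hg, if_neg hg]
      have hr1 : PySem.List.pyRange 1 22 5 = [1, 6, 11, 16, 21] := by decide
      have hr2 : PySem.List.pyRange 1 31 5 = [1, 6, 11, 16, 21, 26] := by decide
      rw [hr1, hr2]
      simp only [convertLoop, List.map]
      norm_num
      have L : ∀ a b : Int, 0 ≤ a → 0 ≤ b → b.toNat - a.toNat = 5 → a.toNat + 5 ≤ 32 →
          convertDigit (PySem.Str.slice s (some a) (some b)) = pvDecode (PySem.Str.slice s (some a) (some b)) :=
        fun a b x1 x2 x3 x4 => digit_eq _ (slice_len5 s h32 a b x1 x2 x3 x4)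
      rw [L 1 6 (by decide) (by decide) (by decide) (by decide),
          L 6 11 (by decide) (by decide) (by decide) (by decide),
          L 11 16 (by decide) (by decide) (by decide) (by decide),
          L 16 21 (by decide) (by decide) (by decide) (by decide),
          L 21 26 (by decide) (by decide) (by decide) (by decide),
          L 26 31 (by decide) (by decide) (by decide) (by decide)]
      generalize pvDecode (PySem.Str.slice s (some 1) (some 6)) = u1
      generalize pvDecode (PySem.Str.slice s (some 6) (some 11)) = u2
      generalize pvDecode (PySem.Str.slice s (some 11) (some 16)) = u3
      generalize pvDecode (PySem.Str.slice s (some 16) (some 21)) = u4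
      generalize pvDecode (PySem.Str.slice s (some 21) (some 26)) = u5
      generalize pvDecode (PySem.Str.slice s (some 26) (some 31)) = u6
      clear hget hg hr1 hr2 L h32
      have hsum : u1 + (u2 + (u3 + (u4 + (u5 + u6)))) = u1 + u2 + u3 + u4 + u5 + u6 := by ring
      rw [hsum]
      by_cases k1 : u1 = -1 <;> by_cases k2 : u2 = -1 <;> by_cases k3 : u3 = -1 <;>
        by_cases k4 : u4 = -1 <;> by_cases k5 : u5 = -1 <;>
        simp [k1, k2, k3, k4, k5, eq_comm]
  · unfold convertBarCode convertBarCode_alt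
    have : PySem.Str.len s ≠ 32 := by
      rw [PySem.Str.len_eq]; intro hc; exact h32 (by exact_mod_cast hc)
    rw [if_pos (Or.inl this), if_pos (Or.inl this)]
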